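-- pv_equiv track=rewrite | github.com/ramvalicharla/financeops | backend/financeops/modules/fdd/service.py | _build_section_narrative
-- ===== SOURCE A (Python) =====
-- def _build_section_narrative(section_name: str, result: dict) -> str:
--     title = section_name.replace("_", " ").title()
--     highlights: list[str] = []
--     if section_name == "quality_of_earnings":
--         highlights.append(f"LTM adjusted EBITDA: {result.get('ltm_adjusted_ebitda', '0')}")
--         highlights.append(f"Revenue quality score: {result.get('revenue_quality_score', '0')}")
--     elif section_name == "working_capital":
--         highlights.append(f"NWC peg: {result.get('nwc_peg', '0')}")
--     elif section_name == "debt_liability":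
--         highlights.append(f"Net debt: {result.get('net_debt', '0')}")
--     elif section_name == "headcount":
--         highlights.append(f"Normalisation adjustment: {result.get('normalisation_adjustment', '0')}")
--     elif section_name == "revenue_quality":
--         highlights.append(f"Quality score: {result.get('quality_score', '0')}")
--     body = "; ".join(str(item) for item in highlights if item)
--     return f"{title} analysis complete. {body}".strip()
-- ===== SOURCE B (Python) =====
-- _TEMPLATES = {
--     "quality_of_earnings": "LTM adjusted EBITDA: {ltm_adjusted_ebitda}; "
--                            "Revenue quality score: {revenue_quality_score}",
--     "working_capital": "NWC peg: {nwc_peg}",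
--     "debt_liability": "Net debt: {net_debt}",
--     "headcount": "Normalisation adjustment: {normalisation_adjustment}",
--     "revenue_quality": "Quality score: {quality_score}",
-- }
--
--
-- def _fill(template: str, result: dict) -> str:
--     # one-pass state-machine scan: outside braces copy chars, inside braces
--     # collect the key, on '}' substitute result.get(key, '0')
--     out: list[str] = []
--     key = None  # None = literal mode, else the key chars collected so far
--     for c in template:
--         if key is None:
--             if c == "{":
--                 key = []
--             else:
--                 out.append(c)
--         else:
--             if c == "}":
--                 out.append(str(result.get("".join(key), "0")))
--                 key = None
--             else:
--                 key.append(c)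
--     return "".join(out)
--
--
-- def _build_section_narrative(section_name: str, result: dict) -> str:
--     title = section_name.replace("_", " ").title()
--     body = _fill(_TEMPLATES.get(section_name, ""), result)
--     return f"{title} analysis complete. {body}".strip()
-- ===== Notes on version B (the rewrite author's own statement) =====
-- stated objective: alternative
-- what changed: Replaced the if/elif branch that builds a list of highlight strings and joins them with a per-section body template ('Label: {key}; ...') rendered by a single character-level state-machine scan that substitutes result.get(key, '0') for each {key} placeholder.
import Mathlib
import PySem

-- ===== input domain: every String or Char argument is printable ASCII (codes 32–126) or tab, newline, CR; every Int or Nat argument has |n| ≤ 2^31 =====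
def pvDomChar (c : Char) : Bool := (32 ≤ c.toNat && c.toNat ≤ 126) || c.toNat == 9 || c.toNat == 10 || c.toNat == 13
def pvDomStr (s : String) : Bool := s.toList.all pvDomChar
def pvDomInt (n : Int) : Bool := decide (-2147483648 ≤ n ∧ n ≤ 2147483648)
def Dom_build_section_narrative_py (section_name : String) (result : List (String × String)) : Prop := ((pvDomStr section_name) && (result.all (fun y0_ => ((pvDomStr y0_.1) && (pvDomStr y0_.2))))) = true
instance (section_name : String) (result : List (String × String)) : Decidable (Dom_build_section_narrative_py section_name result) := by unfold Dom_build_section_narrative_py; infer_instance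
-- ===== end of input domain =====

-- B replaces A's if/elif highlight-list building and join with per-section body
-- templates rendered by a character-level state-machine scan (alternative, same cost).

-- shared primitive: Python str.title(), exact on the ASCII domain (a cased char starting
-- a run of cased chars is uppercased, later cased chars lowercased, others unchanged)
def pyTitleChars : List Char → Bool → List Char
  | [], _ => []
  | c :: rest, prevCased =>
    (if PySem.Chars.isalpha c then
        (if prevCased then PySem.Chars.lowerChar c else PySem.Chars.upperChar c)
      else c) :: pyTitleChars rest (PySem.Chars.isalpha c)

def pyTitle (s : String) : String := String.ofList (pyTitleChars s.toList false)

-- shared primitive: result.get(key, '0') on the association list (first match)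
def pyGet0 (result : List (String × String)) (k : String) : String :=
  PySem.Dict.getD (PySem.Dict.mk result) k "0"

-- ===== PORT A =====
def build_section_narrative_py (section_name : String) (result : List (String × String)) : String :=
  let title := pyTitle (PySem.Str.replace section_name "_" " ")
  let highlights : List String :=
    if section_name == "quality_of_earnings" then
      ["LTM adjusted EBITDA: " ++ pyGet0 result "ltm_adjusted_ebitda",
       "Revenue quality score: " ++ pyGet0 result "revenue_quality_score"]
    else if section_name == "working_capital" then
      ["NWC peg: " ++ pyGet0 result "nwc_peg"]
    else if section_name == "debt_liability" then
      ["Net debt: " ++ pyGet0 result "net_debt"]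
    else if section_name == "headcount" then
      ["Normalisation adjustment: " ++ pyGet0 result "normalisation_adjustment"]
    else if section_name == "revenue_quality" then
      ["Quality score: " ++ pyGet0 result "quality_score"]
    else []
  let body := PySem.Str.join "; " (highlights.filter (fun item => !(item == "")))
  PySem.Str.strip (title ++ " analysis complete. " ++ body)

-- ===== PORT B =====
def pvTemplates : PySem.Dict String String :=
  PySem.Dict.mk
    [("quality_of_earnings",
        "LTM adjusted EBITDA: {ltm_adjusted_ebitda}; Revenue quality score: {revenue_quality_score}"),
     ("working_capital", "NWC peg: {nwc_peg}"),
     ("debt_liability", "Net debt: {net_debt}"),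
     ("headcount", "Normalisation adjustment: {normalisation_adjustment}"),
     ("revenue_quality", "Quality score: {quality_score}")]

-- Source B's _fill: one-pass scan; 'none' = literal mode, 'some acc' = collecting a key
def pvFill : List Char → Option (List Char) → List (String × String) → List Char
  | [], _, _ => []
  | c :: rest, none, result =>
    if c = '{' then pvFill rest (some []) result
    else c :: pvFill rest none result
  | c :: rest, some acc, result =>
    if c = '}' then (pyGet0 result (String.ofList acc)).toList ++ pvFill rest none result
    else pvFill rest (some (acc ++ [c])) result

def build_section_narrative_py_alt (section_name : String) (result : List (String × String)) : String :=
  let title := pyTitle (PySem.Str.replace section_name "_" " ")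
  let body := String.ofList
    (pvFill (PySem.Dict.getD pvTemplates section_name "").toList none result)
  PySem.Str.strip (title ++ " analysis complete. " ++ body)

-- ===== PRECONDITION & SPEC =====
def Spec_build_section_narrative_py (section_name : String) (result : List (String × String)) (out : String) : Prop := out = build_section_narrative_py_alt section_name result
instance (section_name : String) (result : List (String × String)) (out : String) : Decidable (Spec_build_section_narrative_py section_name result out) := by unfold Spec_build_section_narrative_py; infer_instance

-- ===== CLAIM (what is proved, stated in full; the proofs are below) =====
def Claim_equal_build_section_narrative_py : Prop := ∀ (section_name : String) (result : List (String × String)), Dom_build_section_narrative_py section_name result → Spec_build_section_narrative_py section_name result (build_section_narrative_py section_name result)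

-- ===== LEMMAS AND PROOFS =====

theorem lit_append_ne_empty (s t : String) (h : s.toList ≠ []) : (s ++ t == "") = false := by
  simp only [beq_eq_false_iff_ne, ne_eq]
  intro he
  apply h
  have hl : s.toList ++ t.toList = [] := by simpa using congrArg String.toList he
  exact (List.append_eq_nil_iff.mp hl).1

-- ===== VERDICT (by name: the statement is the Claim_ definition above) =====
theorem build_section_narrative_py_spec : Claim_equal_build_section_narrative_py := by
  unfold Claim_equal_build_section_narrative_py
  intro sn result _
  unfold Spec_build_section_narrative_py build_section_narrative_py build_section_narrative_py_alt
  by_cases h1 : sn = "quality_of_earnings"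
  · subst h1
    apply String.toList_inj.mp
    simp [pvTemplates, pvFill, PySem.Dict.getD, PySem.Dict.get?, List.filter,
      lit_append_ne_empty, PySem.Str.toList_strip, PySem.Str.join,
      PySem.Chars.join_cons_cons, PySem.Chars.join_singleton]
  by_cases h2 : sn = "working_capital"
  · subst h2
    apply String.toList_inj.mp
    simp [pvTemplates, pvFill, PySem.Dict.getD, PySem.Dict.get?, List.filter,
      lit_append_ne_empty, PySem.Str.toList_strip, PySem.Str.join,
      PySem.Chars.join_singleton]
  by_cases h3 : sn = "debt_liability"
  · subst h3
    apply String.toList_inj.mp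
    simp [pvTemplates, pvFill, PySem.Dict.getD, PySem.Dict.get?, List.filter,
      lit_append_ne_empty, PySem.Str.toList_strip, PySem.Str.join,
      PySem.Chars.join_singleton]
  by_cases h4 : sn = "headcount"
  · subst h4
    apply String.toList_inj.mp
    simp [pvTemplates, pvFill, PySem.Dict.getD, PySem.Dict.get?, List.filter,
      lit_append_ne_empty, PySem.Str.toList_strip, PySem.Str.join,
      PySem.Chars.join_singleton]
  by_cases h5 : sn = "revenue_quality"
  · subst h5
    apply String.toList_inj.mp
    simp [pvTemplates, pvFill, PySem.Dict.getD, PySem.Dict.get?, List.filter,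
      lit_append_ne_empty, PySem.Str.toList_strip, PySem.Str.join,
      PySem.Chars.join_singleton]
  · simp [pvTemplates, pvFill, PySem.Dict.getD, PySem.Dict.get?, List.find?, PySem.Str.join,
      show ("quality_of_earnings" == sn) = false by simp [Ne.symm h1],
      show ("working_capital" == sn) = false by simp [Ne.symm h2],
      show ("debt_liability" == sn) = false by simp [Ne.symm h3],
      show ("headcount" == sn) = false by simp [Ne.symm h4],
      show ("revenue_quality" == sn) = false by simp [Ne.symm h5], h1, h2, h3, h4, h5]
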